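-- pv_equiv track=rewrite | github.com/megascienta/sciona | src/sciona/code_analysis/analysis_contracts/strict_call_contract.py | _collapse_index_proxy_qname
-- ===== SOURCE A (Python) =====
-- def _collapse_index_proxy_qname(value: str) -> tuple[str, ...]:
--     parts = [part for part in value.split(".") if part]
--     if not parts:
--         return ()
--     collapsed: list[str] = []
--     last_index = len(parts) - 1
--     for idx, part in enumerate(parts):
--         if idx != last_index and part == "index":
--             continue
--         collapsed.append(part)
--     return tuple(collapsed)
-- ===== SOURCE B (Python) =====
-- def _collapse_index_proxy_qname(value: str) -> tuple[str, ...]: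
--     def keep(parts):
--         if len(parts) <= 1:
--             return parts
--         rest = keep(parts[1:])
--         return rest if parts[0] == "index" else (parts[0],) + rest
--     return keep(tuple(p for p in value.split(".") if p))
-- ===== Notes on version B (the rewrite author's own statement) =====
-- stated objective: alternative
-- what changed: Replaces the index-tracking enumerate loop with a structural recursion over the segment list whose base case (a list of at most one element) keeps the final segment verbatim, so no position bookkeeping or accumulator is needed.
import Mathlib
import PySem

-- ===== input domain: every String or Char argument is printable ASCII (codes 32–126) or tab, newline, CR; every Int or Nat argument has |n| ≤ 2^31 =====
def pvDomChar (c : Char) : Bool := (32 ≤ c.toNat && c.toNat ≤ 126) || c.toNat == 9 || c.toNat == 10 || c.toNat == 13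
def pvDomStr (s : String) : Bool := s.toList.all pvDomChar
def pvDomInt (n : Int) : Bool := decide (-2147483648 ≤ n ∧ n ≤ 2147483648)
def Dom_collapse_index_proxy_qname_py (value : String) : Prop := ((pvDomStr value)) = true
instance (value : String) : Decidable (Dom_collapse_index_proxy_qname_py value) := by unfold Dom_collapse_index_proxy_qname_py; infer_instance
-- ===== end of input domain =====

-- B replaces A's position-tracking loop with a structural recursion whose base case keeps the final segment; same return value everywhere.

-- ===== PORT A =====
def collapse_index_proxy_qname_py (value : String) : List String :=
  let parts := ((PySem.Str.split? value ".").getD []).filter (fun p => p ≠ "")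
  if parts = [] then []
  else
    let last_index : Int := (parts.length : Int) - 1
    (PySem.List.enumerate parts).foldl
      (fun collapsed ip =>
        if ip.1 ≠ last_index ∧ ip.2 = "index" then collapsed
        else collapsed ++ [ip.2]) []

-- ===== PORT B =====
-- recursion 'keep' from Source B: lists of length ≤ 1 are returned as-is, otherwise
-- recurse on the tail and prepend the head unless it is "index"
def collapse_index_proxy_qname_py_keep : List String → List String
  | [] => []
  | [x] => [x]
  | x :: y :: t =>
      let rest := collapse_index_proxy_qname_py_keep (y :: t)
      if x = "index" then rest else x :: rest

def collapse_index_proxy_qname_py_alt (value : String) : List String :=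
  collapse_index_proxy_qname_py_keep
    (((PySem.Str.split? value ".").getD []).filter (fun p => p ≠ ""))

-- ===== PRECONDITION & SPEC =====
def Spec_collapse_index_proxy_qname_py (value : String) (out : List String) : Prop := out = collapse_index_proxy_qname_py_alt value
instance (value : String) (out : List String) : Decidable (Spec_collapse_index_proxy_qname_py value out) := by unfold Spec_collapse_index_proxy_qname_py; infer_instance

-- ===== CLAIM (what is proved, stated in full; the proofs are below) =====
def Claim_equal_collapse_index_proxy_qname_py : Prop := ∀ (value : String), Dom_collapse_index_proxy_qname_py value → Spec_collapse_index_proxy_qname_py value (collapse_index_proxy_qname_py value)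

-- ===== LEMMAS AND PROOFS =====

-- A's loop appends the kept elements to the accumulator: fold = acc ++ kept.
theorem foldl_keep_eq {α : Type} (cond : Int × α → Prop) [DecidablePred cond]
    (l : List (Int × α)) (acc : List α) :
    l.foldl (fun c ip => if cond ip then c else c ++ [ip.2]) acc
      = acc ++ (l.filter (fun ip => decide ¬ cond ip)).map (·.2) := by
  induction l generalizing acc with
  | nil => simp
  | cons x t ih =>
      by_cases h : cond x <;> simp [h, ih]

-- The kept elements of enumerate (b ++ [x]) with last index b.length are exactly
-- the non-"index" elements of b followed by x.
theorem kept_concat (b : List String) (x : String) :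
    ((PySem.List.enumerate (b ++ [x])).filter
        (fun ip => decide ¬ (ip.1 ≠ ((b ++ [x]).length : Int) - 1 ∧ ip.2 = "index"))).map (·.2)
      = b.filter (fun p => p ≠ "index") ++ [x] := by
  rw [PySem.List.enumerate_append]
  rw [List.filter_append, List.map_append]
  have hlast : ((PySem.List.enumerate [x] (0 + b.length)).filter
      (fun ip => decide ¬ (ip.1 ≠ ((b ++ [x]).length : Int) - 1 ∧ ip.2 = "index"))).map (·.2) = [x] := by
    simp [PySem.List.enumerate]
  rw [hlast]
  congr 1
  have hcong : (PySem.List.enumerate b 0).filter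
      (fun ip => decide ¬ (ip.1 ≠ ((b ++ [x]).length : Int) - 1 ∧ ip.2 = "index"))
      = (PySem.List.enumerate b 0).filter (fun ip => decide (ip.2 ≠ "index")) := by
    apply List.filter_congr
    intro p hp
    rcases (PySem.List.mem_enumerate_iff _ _ _).1 hp with ⟨k, hk, rfl⟩
    simp only [decide_eq_decide]
    constructor
    · intro h hne
      exact h ⟨by simp; omega, hne⟩
    · intro h hc
      exact h hc.2
  rw [hcong]
  have : (PySem.List.enumerate b 0).filter (fun ip => decide (ip.2 ≠ "index"))
      = (PySem.List.enumerate b 0).filter ((fun p => decide (p ≠ "index")) ∘ (·.2)) := rfl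
  rw [this, ← List.filter_map, PySem.List.map_snd_enumerate]

-- B's recursion computes: filter "index" out of the prefix, keep the last verbatim.
theorem keep_eq (b : List String) (x : String) :
    collapse_index_proxy_qname_py_keep (b ++ [x])
      = b.filter (fun p => p ≠ "index") ++ [x] := by
  induction b with
  | nil => simp [collapse_index_proxy_qname_py_keep]
  | cons y t ih =>
      cases t with
      | nil =>
          by_cases h : y = "index" <;>
            simp [collapse_index_proxy_qname_py_keep, h]
      | cons z s =>
          have ih' := ih
          simp only [List.cons_append] at ih'
          by_cases h : y = "index" <;>
            simp [collapse_index_proxy_qname_py_keep, h, ih']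

-- The whole body equality, for an arbitrary (already split and filtered) segment list.
theorem body_eq (l : List String) :
    (if l = [] then []
     else (PySem.List.enumerate l).foldl
        (fun collapsed ip =>
          if ip.1 ≠ ((l.length : Int) - 1) ∧ ip.2 = "index" then collapsed
          else collapsed ++ [ip.2]) [])
    = collapse_index_proxy_qname_py_keep l := by
  rcases List.eq_nil_or_concat l with rfl | ⟨b, x, rfl⟩
  · simp [collapse_index_proxy_qname_py_keep]
  · rw [List.concat_eq_append]
    have hne : b ++ [x] ≠ [] := by simp
    rw [if_neg hne]
    rw [foldl_keep_eq (fun ip => ip.1 ≠ ((b ++ [x]).length : Int) - 1 ∧ ip.2 = "index")]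
    rw [kept_concat, keep_eq, List.nil_append]

-- ===== VERDICT (by name: the statement is the Claim_ definition above) =====
theorem collapse_index_proxy_qname_py_spec : Claim_equal_collapse_index_proxy_qname_py := by
  intro value _
  unfold Spec_collapse_index_proxy_qname_py collapse_index_proxy_qname_py collapse_index_proxy_qname_py_alt
  exact body_eq _
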